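-- pv_equiv track=rewrite | github.com/locacaoeventos/locacaoeventos-master | locacaoeventos/apps/user/chat/views.py | verify_phone_number
-- ===== SOURCE A (Python) =====
-- def verify_phone_number(text_verification):
--     text = text_verification.replace("um", "1").replace("dois", "2").replace("três", "3").replace("tres", "3").replace("quatro", "4").replace("cinco", "5").replace("seis", "6").replace("sete", "7").replace("oito", "8").replace("nove", "9").replace(" ", "").replace("-", "").replace(".", "").replace("+", "").replace(",", "").replace("=", "").replace(";", "").replace("/", "").replace("(", "").replace(")", "").replace("*", "").replace("#", "").replace("$", "").replace("!", "").replace("%", "").replace("[", "").replace("]", "").replace("{", "").replace("}", "")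
--     text_list = list(text)
--
--     count_number = 0
--     for i in range(len(text_list)):
--         char = text_list[i]
--         is_number = char.isdigit()
--         if is_number:
--             count_number += 1
--         else:
--             count_number = 0
--
--         if count_number == 9:
--             return True
--     return False
-- ===== SOURCE B (Python) =====
-- def verify_phone_number(text_verification):
--     text = text_verification.replace("um", "1").replace("dois", "2").replace("três", "3").replace("tres", "3").replace("quatro", "4").replace("cinco", "5").replace("seis", "6").replace("sete", "7").replace("oito", "8").replace("nove", "9").replace(" ", "").replace("-", "").replace(".", "").replace("+", "").replace(",", "").replace("=", "").replace(";", "").replace("/", "").replace("(", "").replace(")", "").replace("*", "").replace("#", "").replace("$", "").replace("!", "").replace("%", "").replace("[", "").replace("]", "").replace("{", "").replace("}", "")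
--     n = len(text)
--     i = 0
--     while i < n:
--         # skip the non-digit prefix
--         while i < n and not text[i].isdigit():
--             i += 1
--         # measure the maximal digit run starting at i
--         j = i
--         while j < n and text[j].isdigit():
--             j += 1
--         if j - i >= 9:
--             return True
--         i = j
--     return False
-- ===== Notes on version B (the rewrite author's own statement) =====
-- stated objective: alternative
-- what changed: Replaces the per-character resetting counter with a maximal-digit-run grouping scan: repeatedly drop the non-digit prefix, measure the whole digit run at the front, and succeed iff some run has length >= 9.
import Mathlib
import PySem

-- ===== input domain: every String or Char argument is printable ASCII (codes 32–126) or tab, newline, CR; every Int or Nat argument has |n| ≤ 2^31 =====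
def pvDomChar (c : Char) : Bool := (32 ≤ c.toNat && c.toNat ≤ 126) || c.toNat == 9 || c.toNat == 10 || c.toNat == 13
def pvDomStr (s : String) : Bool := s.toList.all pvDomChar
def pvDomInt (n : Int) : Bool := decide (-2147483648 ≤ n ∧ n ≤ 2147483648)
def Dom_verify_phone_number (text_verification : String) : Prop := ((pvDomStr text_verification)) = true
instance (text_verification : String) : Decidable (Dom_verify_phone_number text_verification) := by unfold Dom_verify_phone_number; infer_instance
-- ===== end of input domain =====

-- B is an alternative same-cost scan: it groups maximal digit runs instead of keeping a resetting counter.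

-- ===== PORT A =====
-- the resetting-counter loop of A ('for i in range(len(text_list))' walked as structural recursion over the chars)
def pvLoopA : List Char → Nat → Bool
  | [], _ => false
  | c :: rest, count =>
      let count' := if PySem.Chars.isdigit c then count + 1 else 0
      if count' = 9 then true else pvLoopA rest count'

def verify_phone_number (text_verification : String) : Bool :=
  let text := ((((((((((((((((((((((((((((text_verification.replace "um" "1").replace "dois" "2").replace "três" "3").replace "tres" "3").replace "quatro" "4").replace "cinco" "5").replace "seis" "6").replace "sete" "7").replace "oito" "8").replace "nove" "9").replace " " "").replace "-" "").replace "." "").replace "+" "").replace "," "").replace "=" "").replace ";" "").replace "/" "").replace "(" "").replace ")" "").replace "*" "").replace "#" "").replace "$" "").replace "!" "").replace "%" "").replace "[" "").replace "]" "").replace "{" "").replace "}" ""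
  pvLoopA text.toList 0

-- ===== PORT B =====
-- the head of a non-empty dropWhile result fails the predicate (used only for termination of pvRunCheck)
theorem pv_dropWhile_head (p : Char → Bool) : ∀ (l : List Char) (a : Char) (t : List Char),
    l.dropWhile p = a :: t → p a = false := by
  intro l
  induction l with
  | nil => intro a t h; simp at h
  | cons c r ih =>
      intro a t h
      by_cases hc : p c = true
      · rw [List.dropWhile_cons_of_pos hc] at h; exact ih a t h
      · have hc' : p c = false := by simpa using hc
        rw [List.dropWhile_cons_of_neg (by simp [hc'])] at h
        injection h with h1 _
        exact h1 ▸ hc'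

-- dropping the front digit run past the non-digit prefix strictly shrinks the list (termination of pvRunCheck)
theorem pv_drop_run_lt (l : List Char) (h : l.dropWhile (fun c => !PySem.Chars.isdigit c) ≠ []) :
    ((l.dropWhile (fun c => !PySem.Chars.isdigit c)).drop
      ((l.dropWhile (fun c => !PySem.Chars.isdigit c)).takeWhile PySem.Chars.isdigit).length).length < l.length := by
  have hle : (l.dropWhile (fun c => !PySem.Chars.isdigit c)).length ≤ l.length :=
    List.length_dropWhile_le _ _
  cases hd : l.dropWhile (fun c => !PySem.Chars.isdigit c) with
  | nil => exact absurd hd h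
  | cons a t =>
      have ha : PySem.Chars.isdigit a = true := by
        have := pv_dropWhile_head (fun c => !PySem.Chars.isdigit c) l a t hd
        simpa using this
      rw [hd] at hle
      rw [List.takeWhile_cons_of_pos ha]
      rw [List.length_drop]
      simp only [List.length_cons] at hle ⊢
      omega

-- B's outer 'while chars' loop: drop the non-digit prefix, measure the front digit run, recurse past it
def pvRunCheck (l : List Char) : Bool :=
  let l' := l.dropWhile (fun c => !PySem.Chars.isdigit c)
  if h : l' = [] then false
  else
    let n := (l'.takeWhile PySem.Chars.isdigit).length
    if 9 ≤ n then true else pvRunCheck (l'.drop n)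
termination_by l.length
decreasing_by
  simpa using pv_drop_run_lt l h

def verify_phone_number_alt (text_verification : String) : Bool :=
  let text := ((((((((((((((((((((((((((((text_verification.replace "um" "1").replace "dois" "2").replace "três" "3").replace "tres" "3").replace "quatro" "4").replace "cinco" "5").replace "seis" "6").replace "sete" "7").replace "oito" "8").replace "nove" "9").replace " " "").replace "-" "").replace "." "").replace "+" "").replace "," "").replace "=" "").replace ";" "").replace "/" "").replace "(" "").replace ")" "").replace "*" "").replace "#" "").replace "$" "").replace "!" "").replace "%" "").replace "[" "").replace "]" "").replace "{" "").replace "}" ""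
  pvRunCheck text.toList

-- ===== PRECONDITION & SPEC =====
def Spec_verify_phone_number (text_verification : String) (out : Bool) : Prop := out = verify_phone_number_alt text_verification
instance (text_verification : String) (out : Bool) : Decidable (Spec_verify_phone_number text_verification out) := by unfold Spec_verify_phone_number; infer_instance

-- ===== CLAIM (what is proved, stated in full; the proofs are below) =====
def Claim_equal_verify_phone_number : Prop := ∀ (text_verification : String), Dom_verify_phone_number text_verification → Spec_verify_phone_number text_verification (verify_phone_number text_verification)

-- ===== LEMMAS AND PROOFS =====

-- at count 0, A's loop ignores a non-digit prefix
theorem pvLoopA_dropWhile (l : List Char) :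
    pvLoopA (l.dropWhile (fun c => !PySem.Chars.isdigit c)) 0 = pvLoopA l 0 := by
  induction l with
  | nil => rfl
  | cons c rest ih =>
      by_cases hc : PySem.Chars.isdigit c = true
      · simp [List.dropWhile, hc]
      · have hc' : PySem.Chars.isdigit c = false := by simpa using hc
        simp [List.dropWhile, hc', pvLoopA, ih]

-- walking a digit run that stays below 9 just adds its length to the counter
theorem pvLoopA_digits_lt (t : List Char) :
    ∀ (rest : List Char) (k : Nat), (∀ c ∈ t, PySem.Chars.isdigit c = true) →
    k + t.length < 9 → pvLoopA (t ++ rest) k = pvLoopA rest (k + t.length) := by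
  induction t with
  | nil => intro rest k _ _; simp
  | cons c t ih =>
      intro rest k hall hlt
      have hc : PySem.Chars.isdigit c = true := hall c (by simp)
      have h9 : ¬ (k + 1 = 9) := by simp at hlt; omega
      simp only [List.cons_append, pvLoopA, hc, if_true, if_neg h9]
      rw [ih rest (k + 1) (fun c hm => hall c (by simp [hm])) (by simp at hlt ⊢; omega)]
      congr 1
      simp; omega

-- a digit run long enough to push the counter to 9 makes A's loop return True
theorem pvLoopA_digits_ge (t : List Char) :
    ∀ (rest : List Char) (k : Nat), (∀ c ∈ t, PySem.Chars.isdigit c = true) →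
    9 ≤ k + t.length → k < 9 → pvLoopA (t ++ rest) k = true := by
  induction t with
  | nil => intro rest k _ h1 h2; simp at h1; omega
  | cons c t ih =>
      intro rest k hall h1 h2
      have hc : PySem.Chars.isdigit c = true := hall c (by simp)
      by_cases h9 : k + 1 = 9
      · simp [pvLoopA, hc, h9]
      · simp only [List.cons_append, pvLoopA, hc, if_true, if_neg h9]
        exact ih rest (k + 1) (fun c hm => hall c (by simp [hm])) (by simp at h1; omega) (by omega)

-- a counter value is irrelevant when the next char (if any) is not a digit
theorem pvLoopA_reset (rest : List Char) (k : Nat)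
    (h : rest = [] ∨ PySem.Chars.isdigit (rest.headD ' ') = false) :
    pvLoopA rest k = pvLoopA rest 0 := by
  cases rest with
  | nil => rfl
  | cons c r =>
      rcases h with h | h
      · exact absurd h (by simp)
      · simp at h
        simp [pvLoopA, h]

-- the two scans agree on every character list
theorem pvLoopA_eq_pvRunCheck (l : List Char) : pvLoopA l 0 = pvRunCheck l := by
  induction hn : l.length using Nat.strong_induction_on generalizing l with
  | _ n ih =>
  subst hn
  rw [← pvLoopA_dropWhile l]
  rw [pvRunCheck.eq_def]
  set l' := l.dropWhile (fun c => !PySem.Chars.isdigit c) with hl'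
  by_cases hemp : l' = []
  · simp [hemp, pvLoopA]
  · simp only [dif_neg hemp]
    set t := l'.takeWhile PySem.Chars.isdigit with ht
    have hall : ∀ c ∈ t, PySem.Chars.isdigit c = true := fun c hm => List.mem_takeWhile_imp hm
    have hsplit : t ++ l'.dropWhile PySem.Chars.isdigit = l' := List.takeWhile_append_dropWhile
    have hdroplen : l'.drop t.length = l'.dropWhile PySem.Chars.isdigit := by
      conv_lhs => rw [← hsplit]
      simpa using List.drop_left t (l'.dropWhile PySem.Chars.isdigit)
    have hn1 : 1 ≤ t.length := by
      cases hc : l' with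
      | nil => exact absurd hc hemp
      | cons a r =>
          have ha : PySem.Chars.isdigit a = true := by
            have := pv_dropWhile_head (fun c => !PySem.Chars.isdigit c) l a r (hl' ▸ hc)
            simpa using this
          simp [ht, hc, List.takeWhile_cons_of_pos ha]
    by_cases h9 : 9 ≤ t.length
    · rw [if_pos h9, ← hsplit]
      exact pvLoopA_digits_ge t _ 0 hall (by omega) (by omega)
    · rw [if_neg h9]
      have hstep : pvLoopA l' 0 = pvLoopA (l'.dropWhile PySem.Chars.isdigit) t.length := by
        conv_lhs => rw [← hsplit]
        have := pvLoopA_digits_lt t (l'.dropWhile PySem.Chars.isdigit) 0 hall (by omega)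
        simpa using this
      rw [hstep, hdroplen]
      rw [pvLoopA_reset _ _ ?_]
      · have hlt : (l'.drop t.length).length < l.length := by
          have h1 : l'.length ≤ l.length := List.length_dropWhile_le _ _
          have h3 : 0 < l'.length := List.length_pos_of_ne_nil hemp
          rw [List.length_drop]; omega
        rw [← hdroplen]
        exact ih _ hlt _ rfl
      · cases hc : l'.dropWhile PySem.Chars.isdigit with
        | nil => exact Or.inl rfl
        | cons a r =>
            have ha := pv_dropWhile_head PySem.Chars.isdigit l' a r hc
            exact Or.inr (by simpa using ha)

-- ===== VERDICT (by name: the statement is the Claim_ definition above) =====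
theorem verify_phone_number_spec : Claim_equal_verify_phone_number := by
  intro s _
  unfold Spec_verify_phone_number verify_phone_number verify_phone_number_alt
  exact pvLoopA_eq_pvRunCheck _
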